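-- pv_equiv track=rewrite | github.com/TrentCarter/lnsp-phase-4 | tools/run_consultant_eval.py | compute_hits
-- ===== SOURCE A (Python) =====
-- from typing import Dict, Iterable, List, Optional, Sequence, Tuple
--
-- def compute_hits(records: Iterable[Dict[str, object]]) -> Tuple[int, int]:
--     hit1 = 0
--     hit3 = 0
--     for record in records:
--         gold = set(record["gold"])
--         ranked = record["ranked"]
--         if not gold or not ranked:
--             continue
--         if ranked[0] in gold:
--             hit1 += 1
--         if any(doc in gold for doc in ranked[:3]):
--             hit3 += 1
--     return hit1, hit3
-- ===== SOURCE B (Python) =====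
-- def compute_hits(records):
--     hit1 = 0
--     hit3 = 0
--     for record in records:
--         gold = record["gold"]
--         ranked = record["ranked"]
--         if not gold or not ranked:
--             continue
--         # inverted index: position of each of the top-3 ranked docs (first occurrence wins)
--         pos = {}
--         for i, doc in enumerate(ranked[:3]):
--             pos.setdefault(doc, i)
--         best = min((pos[g] for g in gold if g in pos), default=None)
--         if best is not None:
--             hit3 += 1
--             if best == 0:
--                 hit1 += 1
--     return hit1, hit3
-- ===== Notes on version B (the rewrite author's own statement) =====
-- stated objective: alternative
-- what changed: B inverts the membership direction: instead of building a set of gold docs and scanning the ranked list against it, B builds a first-occurrence position index of the top-3 ranked docs and scans the gold list against it, deriving both counters from the minimum matched position.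
import Mathlib
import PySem

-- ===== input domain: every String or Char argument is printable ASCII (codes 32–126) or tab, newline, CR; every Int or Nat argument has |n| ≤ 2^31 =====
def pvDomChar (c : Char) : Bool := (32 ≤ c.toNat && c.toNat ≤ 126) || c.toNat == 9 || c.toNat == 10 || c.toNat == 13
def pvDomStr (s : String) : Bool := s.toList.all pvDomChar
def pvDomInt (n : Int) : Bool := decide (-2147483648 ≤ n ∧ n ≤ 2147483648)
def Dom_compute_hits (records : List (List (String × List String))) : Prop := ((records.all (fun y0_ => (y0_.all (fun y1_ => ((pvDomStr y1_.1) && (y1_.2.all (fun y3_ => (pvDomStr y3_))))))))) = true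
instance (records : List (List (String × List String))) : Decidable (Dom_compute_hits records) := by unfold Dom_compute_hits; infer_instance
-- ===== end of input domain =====

-- B inverts the membership direction (position index of the top-3 ranked docs, scanned by
-- the gold list); same asymptotic cost. Equivalence is on return values only.

-- ===== PORT A =====
-- one loop iteration of A: the two independent membership tests with their guards
def pvStepA (acc : Int × Int) (record : List (String × List String)) : Int × Int :=
  match record.lookup "gold", record.lookup "ranked" with
  | some goldL, some ranked =>
    let gold : PySem.Set String := PySem.Set.ofList goldL
    if gold = [] ∨ ranked = [] then acc
    else
      let acc1 :=
        match PySem.List.pyGet? ranked 0 with   -- ranked[0]; the guard makes it in range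
        | some d => if gold.contains d then (acc.1 + 1, acc.2) else acc
        | none => acc
      if (PySem.List.slice ranked none (some 3)).any (fun d => gold.contains d) then
        (acc1.1, acc1.2 + 1)
      else acc1
  | _, _ => acc   -- KeyError in Python; excluded by Pre_

def compute_hits (records : List (List (String × List String))) : Int × Int :=
  records.foldl pvStepA (0, 0)

-- ===== PORT B =====
-- one loop iteration of B: build the first-occurrence position index of the top-3
-- ranked docs ('for i, doc in enumerate(ranked[:3]): pos.setdefault(doc, i)'),
-- then take the minimum position matched by a gold doc
def pvStepB (acc : Int × Int) (record : List (String × List String)) : Int × Int :=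
  match record.lookup "gold", record.lookup "ranked" with
  | some gold, some ranked =>
    if gold = [] ∨ ranked = [] then acc
    else
      let pos : PySem.Dict String Int :=
        ((PySem.List.slice ranked none (some 3)).foldl
          (fun (s : PySem.Dict String Int × Int) doc => (PySem.Dict.setdefault s.1 doc s.2, s.2 + 1))
          (PySem.Dict.empty, 0)).1
      match PySem.List.min? (gold.filterMap (fun g => pos.get? g)) (fun x => x) with
      | none => acc
      | some best => (if best = 0 then acc.1 + 1 else acc.1, acc.2 + 1)
  | _, _ => acc   -- KeyError in Python; excluded by Pre_

def compute_hits_alt (records : List (List (String × List String))) : Int × Int :=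
  records.foldl pvStepB (0, 0)

-- ===== PRECONDITION & SPEC =====
-- Pre_ excludes exactly the records missing a "gold" or "ranked" key, on which A raises KeyError.
def Pre_compute_hits (records : List (List (String × List String))) : Prop :=
  ∀ record ∈ records, (record.lookup "gold").isSome ∧ (record.lookup "ranked").isSome
instance (records : List (List (String × List String))) : Decidable (Pre_compute_hits records) := by
  unfold Pre_compute_hits; infer_instance

def pvWitness_compute_hits : (List (List (String × List String))) :=
  [[("gold", ["a", "b"]), ("ranked", ["a", "c"])], [("gold", []), ("ranked", ["a"])]]

def Spec_compute_hits (records : List (List (String × List String))) (out : Int × Int) : Prop := out = compute_hits_alt records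
instance (records : List (List (String × List String))) (out : Int × Int) : Decidable (Spec_compute_hits records out) := by unfold Spec_compute_hits; infer_instance

-- ===== CLAIM (what is proved, stated in full; the proofs are below) =====
def Claim_equal_compute_hits : Prop := ∀ (records : List (List (String × List String))), Dom_compute_hits records → Pre_compute_hits records → Spec_compute_hits records (compute_hits records)

-- ===== LEMMAS AND PROOFS =====

-- characterisation of B's position index: lookup = first index in the scanned list (offset i),
-- behind whatever the start dictionary already holds
theorem pvPos_get (top : List String) (d0 : PySem.Dict String Int) (i : Int) (x : String) :
    ((top.foldl (fun (s : PySem.Dict String Int × Int) doc => (PySem.Dict.setdefault s.1 doc s.2, s.2 + 1)) (d0, i)).1).get? x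
      = (d0.get? x).or ((top.findIdx? (fun y => y == x)).map (fun (j : Nat) => i + (j : Int))) := by
  induction top generalizing d0 i with
  | nil => simp
  | cons h t ih =>
    simp only [List.foldl_cons, ih, List.findIdx?_cons]
    by_cases hx : h = x
    · subst hx
      simp only [beq_self_eq_true, if_true]
      rw [PySem.Dict.get?_setdefault_self]
      cases hd : d0.get? h <;> simp
    · have hne : x ≠ h := fun e => hx e.symm
      rw [PySem.Dict.get?_setdefault_of_ne d0 i hne]
      have hb : (h == x) = false := by simp [hx]
      simp only [hb, Bool.false_eq_true, if_false, Option.map_map]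
      congr 1
      cases hf : t.findIdx? (fun y => y == x) with
      | none => simp
      | some j =>
        simp only [Option.map_some, Function.comp_apply]
        congr 1
        push_cast
        ring

theorem pvStep_eq (acc : Int × Int) (record : List (String × List String)) :
    pvStepA acc record = pvStepB acc record := by
  unfold pvStepA pvStepB
  cases hg : record.lookup "gold" with
  | none => rfl
  | some gold =>
    cases hr : record.lookup "ranked" with
    | none => rfl
    | some ranked =>
      simp only
      have hcont : ∀ x, ((PySem.Set.ofList gold).contains x = true) ↔ x ∈ gold := by
        intro x; simp [PySem.Set.mem_ofList]
      by_cases hgold : gold = []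
      · have hs : PySem.Set.ofList gold = [] := by subst hgold; rfl
        simp [hgold]
      · have hsne : PySem.Set.ofList gold ≠ [] := by
          intro h
          obtain ⟨x, hx⟩ := List.exists_mem_of_ne_nil _ hgold
          have : x ∈ PySem.Set.ofList gold := (PySem.Set.mem_ofList gold x).mpr hx
          simp [h] at this
        cases ranked with
        | nil => simp
        | cons d t =>
          have hguardA : ¬ (PySem.Set.ofList gold = [] ∨ d :: t = []) := by simp [hsne]
          have hguardB : ¬ (gold = [] ∨ d :: t = []) := by simp [hgold]
          simp only [hguardA, hguardB, if_false]
          have hslice : PySem.List.slice (d :: t) none (some 3) = d :: t.take 2 := by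
            have := PySem.List.slice_to_natCast (d :: t) 3
            simpa using this
          rw [hslice]
          set top := d :: t.take 2 with htop
          set pos := ((top.foldl (fun (s : PySem.Dict String Int × Int) doc => (PySem.Dict.setdefault s.1 doc s.2, s.2 + 1)) (PySem.Dict.empty, 0)).1) with hposdef
          have hpos : ∀ x, pos.get? x = (top.findIdx? (fun y => y == x)).map (fun (j : Nat) => (j : Int)) := by
            intro x
            rw [hposdef, pvPos_get]
            cases hf : top.findIdx? (fun y => y == x) <;> simp
          have hmemtop : ∀ x, (pos.get? x).isSome ↔ x ∈ top := by
            intro x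
            rw [hpos]
            cases hf : top.findIdx? (fun y => y == x) with
            | none =>
              have h2 := hf
              rw [List.findIdx?_eq_none_iff] at h2
              simpa using fun hx => by simpa using h2 x hx
            | some j =>
              have hs : (top.findIdx? (fun y => y == x)).isSome = true := by rw [hf]; rfl
              rw [List.findIdx?_isSome] at hs
              obtain ⟨y, hy, hyx⟩ := List.any_eq_true.mp hs
              have : y = x := by simpa using hyx
              subst this
              simp [hy]
          have hnn : ∀ x v, pos.get? x = some v → 0 ≤ v := by
            intro x v h
            rw [hpos] at h
            obtain ⟨j, -, rfl⟩ := Option.map_eq_some_iff.mp h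
            exact Int.natCast_nonneg j
          have hd0 : pos.get? d = some 0 := by
            rw [hpos, htop, List.findIdx?_cons]
            simp
          have honly : ∀ x, pos.get? x = some 0 → x = d := by
            intro x h
            rw [hpos, htop, List.findIdx?_cons] at h
            by_cases hdx : (d == x) = true
            · exact (eq_of_beq hdx).symm
            · simp only [hdx, Bool.false_eq_true, if_false, Option.map_map] at h
              obtain ⟨j, -, hj⟩ := Option.map_eq_some_iff.mp h
              simp only [Function.comp_apply] at hj
              omega
          set cand := gold.filterMap (fun g => pos.get? g) with hcand
          cases hmin : PySem.List.min? cand (fun x => x) with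
          | none =>
            have hcnil : cand = [] := (PySem.List.min?_eq_none_iff _ _).mp hmin
            have hex : ¬ ∃ x ∈ top, x ∈ gold := by
              rintro ⟨x, hx, hxg⟩
              obtain ⟨v, hv⟩ := Option.isSome_iff_exists.mp ((hmemtop x).mpr hx)
              have hvc : v ∈ cand := List.mem_filterMap.mpr ⟨x, hxg, hv⟩
              rw [hcnil] at hvc
              simp at hvc
            have hdg : d ∉ gold := fun h => hex ⟨d, by simp [htop], h⟩
            simp [PySem.List.pyGet?, PySem.List.pyIdx?, hex, hdg]
          | some best =>
            have hbest_mem : best ∈ cand := PySem.List.min?_mem hmin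
            have hbest_min : ∀ y ∈ cand, best ≤ y := fun y hy => PySem.List.min?_isMin hmin y hy
            obtain ⟨g0, hg0, hg0v⟩ := List.mem_filterMap.mp hbest_mem
            have hex : ∃ x ∈ top, x ∈ gold :=
              ⟨g0, (hmemtop g0).mp (by rw [hg0v]; rfl), hg0⟩
            have hd_iff : d ∈ gold ↔ best = 0 := by
              constructor
              · intro h
                have h0 : (0 : Int) ∈ cand := List.mem_filterMap.mpr ⟨d, h, hd0⟩
                have h1 := hbest_min 0 h0
                have h2 := hnn g0 best hg0v
                omega
              · intro h
                subst h
                have he : g0 = d := honly g0 hg0v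
                subst he
                exact hg0
            by_cases hd : d ∈ gold
            · have hb0 : best = 0 := hd_iff.mp hd
              simp [PySem.List.pyGet?, PySem.List.pyIdx?, hex, hd, hb0]
            · have hb0 : ¬ best = 0 := fun h => hd (hd_iff.mpr h)
              simp [PySem.List.pyGet?, PySem.List.pyIdx?, hex, hd, hb0]

-- ===== VERDICT (by name: the statement is the Claim_ definition above) =====
theorem compute_hits_spec : Claim_equal_compute_hits := by
  intro records _ _
  unfold Spec_compute_hits compute_hits compute_hits_alt
  exact PySem.List.foldl_congr_mem _ _ _ _ (fun acc x _ => pvStep_eq acc x)
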